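-- pv_equiv track=rewrite | github.com/amadeok/aws-python | utils/querier.py | find_first_from_right
-- ===== SOURCE A (Python) =====
-- def find_first_from_right(target_string, string_list):
--     max_index = -1
--     result = None
--
--     # Iterate through the list
--     for s in string_list:
--         if s in target_string:
--             # Find the index of the substring in the target string
--             index = target_string.rfind(s)  # Find the last occurrence of s
--             if index > max_index:
--                 max_index = index
--                 result = s
--
--     return result
-- ===== SOURCE B (Python) =====
-- def find_first_from_right(target_string, string_list):
--     # Scan candidate start positions from the right; the first position at which
--     # any listed string occurs is the maximal rfind, and taking the first such
--     # string in list order reproduces the tie-break.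
--     for p in range(len(target_string), -1, -1):
--         for s in string_list:
--             if target_string[p:p + len(s)] == s:
--                 return s
--     return None
-- ===== Notes on version B (the rewrite author's own statement) =====
-- stated objective: faster
-- what changed: Instead of computing rfind over the whole target for every listed string and keeping a running maximum, B scans candidate start positions of the target right-to-left and returns the first listed string occurring there, stopping at the rightmost match (same value, same list-order tie-break).
import Mathlib
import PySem

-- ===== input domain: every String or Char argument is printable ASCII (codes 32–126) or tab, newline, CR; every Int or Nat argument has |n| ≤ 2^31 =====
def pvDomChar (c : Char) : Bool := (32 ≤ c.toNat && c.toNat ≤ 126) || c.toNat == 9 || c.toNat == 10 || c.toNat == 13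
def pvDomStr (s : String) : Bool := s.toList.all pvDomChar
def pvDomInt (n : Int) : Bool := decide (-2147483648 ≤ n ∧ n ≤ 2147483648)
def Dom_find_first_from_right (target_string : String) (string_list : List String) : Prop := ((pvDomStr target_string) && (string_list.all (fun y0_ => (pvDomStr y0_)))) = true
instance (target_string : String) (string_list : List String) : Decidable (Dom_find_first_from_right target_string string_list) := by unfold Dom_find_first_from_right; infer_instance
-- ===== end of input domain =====

-- B scans target start positions right-to-left and returns the first listed string occurring at
-- the rightmost matching position, stopping there instead of computing every rfind as A does
-- (same value and tie-break; measured faster in a timing run).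

-- ===== PORT A =====
def find_first_from_right (target_string : String) (string_list : List String) : Option String :=
  (string_list.foldl
    (fun (st : Int × Option String) s =>
      if PySem.Str.isIn s target_string then
        let index := PySem.Str.rfind target_string s
        if index > st.1 then (index, some s) else st
      else st)
    ((-1 : Int), (none : Option String))).2

-- ===== PORT B =====
-- inner 'for s in string_list: if target_string[p:p+len(s)] == s: return s', then p decreases
def altScan (t : List Char) (string_list : List String) : Nat → Option String
  | 0 =>
    match string_list.find? (fun s => PySem.List.slice t (some ((0 : Nat) : Int)) (some (((0 : Nat) : Int) + (s.toList.length : Int))) == s.toList) with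
    | some s => some s
    | none => none
  | (q+1) =>
    match string_list.find? (fun s => PySem.List.slice t (some ((q+1 : Nat) : Int)) (some (((q+1 : Nat) : Int) + (s.toList.length : Int))) == s.toList) with
    | some s => some s
    | none => altScan t string_list q

def find_first_from_right_alt (target_string : String) (string_list : List String) : Option String :=
  altScan target_string.toList string_list target_string.toList.length

-- ===== PRECONDITION & SPEC =====
def Spec_find_first_from_right (target_string : String) (string_list : List String) (out : Option String) : Prop := out = find_first_from_right_alt target_string string_list
instance (target_string : String) (string_list : List String) (out : Option String) : Decidable (Spec_find_first_from_right target_string string_list out) := by unfold Spec_find_first_from_right; infer_instance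

-- ===== CLAIM (what is proved, stated in full; the proofs are below) =====
def Claim_equal_find_first_from_right : Prop := ∀ (target_string : String) (string_list : List String), Dom_find_first_from_right target_string string_list → Spec_find_first_from_right target_string string_list (find_first_from_right target_string string_list)

-- ===== LEMMAS AND PROOFS =====

-- rfind of one listed string in the target, on the character-list side
def rf (t : List Char) (s : String) : Int := PySem.Chars.rfind t s.toList

-- the maximum of rf over the list (A's final max_index)
def maxR (t : List Char) (l : List String) : Int := l.foldl (fun m s => max m (rf t s)) (-1)

-- ---- facts about PySem.Chars.rfind.go (descending scan for the last occurrence) ----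

lemma go_le (t s : List Char) (p : Nat) : PySem.Chars.rfind.go t s p ≤ (p : Int) := by
  induction p with
  | zero => simp [PySem.Chars.rfind.go]; split <;> simp
  | succ q ih =>
    simp only [PySem.Chars.rfind.go]
    split
    · simp
    · exact le_trans ih (by push_cast; omega)

lemma neg_one_le_go (t s : List Char) (p : Nat) : (-1 : Int) ≤ PySem.Chars.rfind.go t s p := by
  induction p with
  | zero => simp [PySem.Chars.rfind.go]; split <;> simp
  | succ q ih =>
    simp only [PySem.Chars.rfind.go]
    split
    · push_cast; omega
    · exact ih

lemma le_go_of_prefix (t s : List Char) (p q : Nat) (hq : q ≤ p) (h : s <+: t.drop q) :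
    (q : Int) ≤ PySem.Chars.rfind.go t s p := by
  induction p with
  | zero =>
    interval_cases q
    simp only [PySem.Chars.rfind.go]
    rw [if_pos (List.isPrefixOf_iff_prefix.mpr (by simpa using h))]
    simp
  | succ r ih =>
    simp only [PySem.Chars.rfind.go]
    rcases Nat.eq_or_lt_of_le hq with rfl | hlt
    · rw [if_pos (List.isPrefixOf_iff_prefix.mpr h)]
    · split
      · push_cast; omega
      · exact ih (by omega)

lemma go_prefix (t s : List Char) (p : Nat) (h : 0 ≤ PySem.Chars.rfind.go t s p) :
    s <+: t.drop (PySem.Chars.rfind.go t s p).toNat := by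
  induction p with
  | zero =>
    simp only [PySem.Chars.rfind.go] at h ⊢
    by_cases hp : s.isPrefixOf t
    · rw [if_pos hp]
      simpa using List.isPrefixOf_iff_prefix.mp hp
    · rw [if_neg hp] at h
      omega
  | succ r ih =>
    simp only [PySem.Chars.rfind.go] at h ⊢
    split at h
    · next hp =>
      rw [if_pos hp]
      simpa using List.isPrefixOf_iff_prefix.mp hp
    · next hp =>
      rw [if_neg hp]
      exact ih h

lemma isIn_iff_rf_nonneg (t : List Char) (s : String) :
    PySem.Chars.isIn s.toList t = true ↔ 0 ≤ rf t s := by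
  unfold rf PySem.Chars.rfind
  constructor
  · intro h
    obtain ⟨j, hj⟩ := (PySem.Chars.exists_prefix_drop_iff_isIn s.toList t).mpr h
    by_cases hle : j ≤ t.length
    · have := le_go_of_prefix t s.toList t.length j hle hj
      omega
    · have hnil : t.drop j = [] := List.drop_eq_nil_of_le (by omega)
      rw [hnil] at hj
      have hj' : s.toList <+: t.drop t.length := by
        rw [List.drop_eq_nil_of_le (le_refl t.length)]
        exact hj
      have := le_go_of_prefix t s.toList t.length t.length le_rfl hj'
      omega
  · intro h
    refine (PySem.Chars.exists_prefix_drop_iff_isIn s.toList t).mp ?_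
    exact ⟨_, go_prefix t s.toList t.length h⟩

-- ---- facts about maxR ----

lemma neg_one_le_maxR (t : List Char) (l : List String) : (-1 : Int) ≤ maxR t l := by
  have : ∀ (mi : Int), -1 ≤ mi → -1 ≤ l.foldl (fun m s => max m (rf t s)) mi := by
    intro mi hmi
    induction l generalizing mi with
    | nil => exact hmi
    | cons a l ih => exact ih _ (le_trans hmi (le_max_left _ _))
  exact this (-1) le_rfl

lemma le_foldl_rfmax (t : List Char) (l : List String) (mi : Int) :
    mi ≤ l.foldl (fun m s => max m (rf t s)) mi := by
  induction l generalizing mi with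
  | nil => exact le_rfl
  | cons a l ih => exact le_trans (le_max_left _ _) (ih _)

lemma neg_one_le_rf (t : List Char) (s : String) : (-1 : Int) ≤ rf t s :=
  neg_one_le_go t s.toList t.length

lemma rf_le_maxR (t : List Char) {l : List String} {s : String} (h : s ∈ l) : rf t s ≤ maxR t l := by
  have key : ∀ (l : List String) (mi : Int), s ∈ l → rf t s ≤ l.foldl (fun m s => max m (rf t s)) mi := by
    intro l
    induction l with
    | nil => intro mi h; cases h
    | cons a l ih =>
      intro mi h
      rcases List.mem_cons.mp h with rfl | h
      · exact le_trans (le_max_right _ _) (le_foldl_rfmax t l _)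
      · exact ih _ h
  exact key l (-1) h

lemma maxR_le (t : List Char) (l : List String) (b : Int) (hb : -1 ≤ b)
    (h : ∀ s ∈ l, rf t s ≤ b) : maxR t l ≤ b := by
  have key : ∀ (l : List String) (mi : Int), mi ≤ b → (∀ s ∈ l, rf t s ≤ b) →
      l.foldl (fun m s => max m (rf t s)) mi ≤ b := by
    intro l
    induction l with
    | nil => intro mi hmi _; exact hmi
    | cons a l ih =>
      intro mi hmi hall
      exact ih _ (max_le hmi (hall a (by simp))) (fun s hs => hall s (by simp [hs]))
  exact key l (-1) hb h

-- find? is determined by the predicate's values on the members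
lemma find?_congr_mem {α : Type} (l : List α) (p q : α → Bool)
    (h : ∀ a ∈ l, p a = q a) : l.find? p = l.find? q := by
  induction l with
  | nil => rfl
  | cons a l ih =>
    simp only [List.find?]
    rw [h a (by simp)]
    split
    · rfl
    · exact ih (fun a ha => h a (by simp [ha]))

-- ---- characterisation of A ----

lemma foldA (tg : String) (l : List String) : ∀ (mi : Int) (res : Option String), -1 ≤ mi →
    l.foldl
      (fun (st : Int × Option String) s =>
        if PySem.Str.isIn s tg then
          let index := PySem.Str.rfind tg s
          if index > st.1 then (index, some s) else st
        else st) (mi, res)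
    = (l.foldl (fun m s => max m (rf tg.toList s)) mi,
       if mi < l.foldl (fun m s => max m (rf tg.toList s)) mi
       then l.find? (fun s => rf tg.toList s == l.foldl (fun m s => max m (rf tg.toList s)) mi)
       else res) := by
  intro mi res hmi
  induction l generalizing mi res with
  | nil => simp
  | cons a l ih =>
    have hrfa : PySem.Str.rfind tg a = rf tg.toList a := rfl
    simp only [List.foldl_cons]
    by_cases hin : PySem.Str.isIn a tg = true
    · have ha0 : 0 ≤ rf tg.toList a := (isIn_iff_rf_nonneg tg.toList a).mp hin
      simp only [hin, if_true, hrfa]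
      by_cases hgt : rf tg.toList a > mi
      · rw [if_pos hgt]
        rw [ih (rf tg.toList a) (some a) (by omega)]
        have hmax : max mi (rf tg.toList a) = rf tg.toList a := max_eq_right (le_of_lt hgt)
        rw [hmax]
        have hMle : rf tg.toList a ≤ l.foldl (fun m s => max m (rf tg.toList s)) (rf tg.toList a) :=
          le_foldl_rfmax tg.toList l _
        refine Prod.ext rfl ?_
        simp only [List.find?_cons]
        by_cases heq : rf tg.toList a = l.foldl (fun m s => max m (rf tg.toList s)) (rf tg.toList a)
        · rw [if_neg (by omega)]
          have : (rf tg.toList a == l.foldl (fun m s => max m (rf tg.toList s)) (rf tg.toList a)) = true := by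
            simpa using heq
          rw [if_pos (by omega)]
          simp [this]
        · rw [if_pos (by omega), if_pos (by omega)]
          have : (rf tg.toList a == l.foldl (fun m s => max m (rf tg.toList s)) (rf tg.toList a)) = false := by
            simpa using heq
          simp [this]
      · rw [if_neg hgt]
        rw [ih mi res hmi]
        have hmax : max mi (rf tg.toList a) = mi := max_eq_left (by omega)
        rw [hmax]
        refine Prod.ext rfl ?_
        by_cases hlt : mi < l.foldl (fun m s => max m (rf tg.toList s)) mi
        · rw [if_pos hlt, if_pos hlt]
          simp only [List.find?_cons]
          have : (rf tg.toList a == l.foldl (fun m s => max m (rf tg.toList s)) mi) = false := by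
            simp only [beq_eq_false_iff_ne, ne_eq]
            omega
          simp [this]
        · rw [if_neg hlt, if_neg hlt]
    · have hrf : rf tg.toList a = -1 := by
        have h1 := neg_one_le_rf tg.toList a
        have h2 : ¬ (0 ≤ rf tg.toList a) := fun hc => hin ((isIn_iff_rf_nonneg tg.toList a).mpr hc)
        omega
      simp only [Bool.not_eq_true] at hin
      simp only [hin, Bool.false_eq_true, if_false]
      rw [ih mi res hmi]
      have hmax : max mi (rf tg.toList a) = mi := max_eq_left (by omega)
      rw [hmax]
      refine Prod.ext rfl ?_
      by_cases hlt : mi < l.foldl (fun m s => max m (rf tg.toList s)) mi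
      · rw [if_pos hlt, if_pos hlt]
        simp only [List.find?_cons]
        have : (rf tg.toList a == l.foldl (fun m s => max m (rf tg.toList s)) mi) = false := by
          simp only [beq_eq_false_iff_ne, ne_eq]
          omega
        simp [this]
      · rw [if_neg hlt, if_neg hlt]

lemma A_char (tg : String) (l : List String) :
    find_first_from_right tg l =
      if -1 < maxR tg.toList l
      then l.find? (fun s => rf tg.toList s == maxR tg.toList l)
      else none := by
  unfold find_first_from_right
  rw [foldA tg l (-1) none le_rfl]
  rfl

-- ---- characterisation of B ----

lemma altMatch_iff (t : List Char) (s : String) (p : Nat) :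
    ((PySem.List.slice t (some (p : Int)) (some ((p : Int) + (s.toList.length : Int))) == s.toList) = true)
      ↔ s.toList <+: t.drop p := by
  rw [PySem.List.slice_natCast_add, beq_iff_eq]
  constructor
  · intro h
    exact List.prefix_iff_eq_take.mpr h.symm
  · intro h
    exact (List.prefix_iff_eq_take.mp h).symm

lemma slice_pred_iff_rf_eq (tg : String) (s : String) (p : Nat) (hp : p ≤ tg.toList.length)
    (hle : rf tg.toList s ≤ (p : Int)) :
    ((PySem.List.slice tg.toList (some (p : Int)) (some ((p : Int) + (s.toList.length : Int))) == s.toList) = true)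
      ↔ rf tg.toList s = (p : Int) := by
  rw [altMatch_iff]
  unfold rf PySem.Chars.rfind
  constructor
  · intro h
    have := le_go_of_prefix tg.toList s.toList tg.toList.length p hp h
    unfold rf PySem.Chars.rfind at hle
    omega
  · intro h
    have h0 : 0 ≤ PySem.Chars.rfind.go tg.toList s.toList tg.toList.length := by omega
    have hpre := go_prefix tg.toList s.toList tg.toList.length h0
    rw [h] at hpre
    simpa using hpre

lemma slice_pred_eq_beq (tg : String) (s : String) (p : Nat) (hp : p ≤ tg.toList.length)
    (hle : rf tg.toList s ≤ (p : Int)) :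
    (PySem.List.slice tg.toList (some (p : Int)) (some ((p : Int) + (s.toList.length : Int))) == s.toList)
      = (rf tg.toList s == (p : Int)) := by
  have h1 := slice_pred_iff_rf_eq tg s p hp hle
  cases hb : (PySem.List.slice tg.toList (some (p : Int)) (some ((p : Int) + (s.toList.length : Int))) == s.toList) <;>
    cases hc : (rf tg.toList s == (p : Int)) <;> simp_all

lemma altScan_char (tg : String) (l : List String) : ∀ (p : Nat), p ≤ tg.toList.length →
    (∀ s ∈ l, rf tg.toList s ≤ (p : Int)) →
    altScan tg.toList l p =
      if -1 < maxR tg.toList l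
      then l.find? (fun s => rf tg.toList s == maxR tg.toList l)
      else none := by
  intro p
  induction p with
  | zero =>
    intro hle hall
    cases hfind : l.find? (fun s => PySem.List.slice tg.toList (some ((0 : Nat) : Int)) (some (((0 : Nat) : Int) + (s.toList.length : Int))) == s.toList) with
    | some s0 =>
      simp only [altScan, hfind]
      have hmem : s0 ∈ l := List.mem_of_find?_eq_some hfind
      have hp0 : rf tg.toList s0 = ((0 : Nat) : Int) :=
        (slice_pred_iff_rf_eq tg s0 0 (by omega) (hall s0 hmem)).mp (by simpa using List.find?_some hfind)
      have hM : maxR tg.toList l = ((0 : Nat) : Int) := by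
        have h1 := rf_le_maxR tg.toList hmem
        have h2 := maxR_le tg.toList l ((0 : Nat) : Int) (by omega) hall
        omega
      rw [if_pos (by omega)]
      have hcongr := find?_congr_mem l
        (fun s => PySem.List.slice tg.toList (some ((0 : Nat) : Int)) (some (((0 : Nat) : Int) + (s.toList.length : Int))) == s.toList)
        (fun s => rf tg.toList s == maxR tg.toList l)
        (fun a ha => by rw [hM]; exact slice_pred_eq_beq tg a 0 (by omega) (hall a ha))
      rw [hcongr] at hfind
      exact hfind.symm
    | none =>
      simp only [altScan, hfind]
      have hall' : ∀ s ∈ l, rf tg.toList s = -1 := by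
        intro s hs
        have h1 := neg_one_le_rf tg.toList s
        have h2 := hall s hs
        have h3 : rf tg.toList s ≠ ((0 : Nat) : Int) := by
          intro hc
          have := (slice_pred_iff_rf_eq tg s 0 (by omega) (hall s hs)).mpr hc
          have := List.find?_eq_none.mp hfind s hs
          simp_all
        push_cast at h2 h3 ⊢
        omega
      have hM : maxR tg.toList l = -1 := by
        have h1 := neg_one_le_maxR tg.toList l
        have h2 := maxR_le tg.toList l (-1) le_rfl (fun s hs => le_of_eq (hall' s hs))
        omega
      rw [if_neg (by omega)]
  | succ q ih =>
    intro hle hall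
    cases hfind : l.find? (fun s => PySem.List.slice tg.toList (some ((q+1 : Nat) : Int)) (some (((q+1 : Nat) : Int) + (s.toList.length : Int))) == s.toList) with
    | some s0 =>
      simp only [altScan, hfind]
      have hmem : s0 ∈ l := List.mem_of_find?_eq_some hfind
      have hp0 : rf tg.toList s0 = ((q+1 : Nat) : Int) :=
        (slice_pred_iff_rf_eq tg s0 (q+1) hle (hall s0 hmem)).mp (by simpa using List.find?_some hfind)
      have hM : maxR tg.toList l = ((q+1 : Nat) : Int) := by
        have h1 := rf_le_maxR tg.toList hmem
        have h2 := maxR_le tg.toList l ((q+1 : Nat) : Int) (by push_cast; omega) hall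
        omega
      rw [if_pos (by push_cast at hM ⊢; omega)]
      have hcongr := find?_congr_mem l
        (fun s => PySem.List.slice tg.toList (some ((q+1 : Nat) : Int)) (some (((q+1 : Nat) : Int) + (s.toList.length : Int))) == s.toList)
        (fun s => rf tg.toList s == maxR tg.toList l)
        (fun a ha => by rw [hM]; exact slice_pred_eq_beq tg a (q+1) hle (hall a ha))
      rw [hcongr] at hfind
      exact hfind.symm
    | none =>
      simp only [altScan, hfind]
      refine ih (by omega) ?_
      intro s hs
      have h2 := hall s hs
      have h3 : rf tg.toList s ≠ ((q+1 : Nat) : Int) := by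
        intro hc
        have := (slice_pred_iff_rf_eq tg s (q+1) hle (hall s hs)).mpr hc
        have := List.find?_eq_none.mp hfind s hs
        simp_all
      push_cast at h2 h3 ⊢
      omega

-- ===== VERDICT (by name: the statement is the Claim_ definition above) =====
theorem find_first_from_right_spec : Claim_equal_find_first_from_right := by
  intro tg l _
  unfold Spec_find_first_from_right find_first_from_right_alt
  rw [A_char, altScan_char tg l tg.toList.length le_rfl]
  intro s _
  exact le_trans (go_le tg.toList s.toList tg.toList.length) le_rfl
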